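-- pv_equiv track=rewrite | github.com/LaoLiulaoliu/awake | runner/strategy.py | get_high_low_half_hour
-- ===== SOURCE A (Python) =====
-- HALF_HOUR = 1800000
--
-- def get_high_low_half_hour(begin_time, iterator):
--     idx = -1
--     high_hh, low_hh = 0, 100000000
--     for i, data in iterator:
--         timestamp, price = data
--         if begin_time - timestamp < HALF_HOUR:
--             if price > high_hh:
--                 high_hh = price
--             if price < low_hh:
--                 low_hh = price
--             idx = i
--         else:
--             break
--     if idx > 0:
--         return high_hh, low_hh, idx
-- ===== SOURCE B (Python) =====
-- HALF_HOUR = 1800000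
--
-- def get_high_low_half_hour(begin_time, iterator):
--     window = []
--     for row in iterator:
--         if begin_time - row[1][0] >= HALF_HOUR:
--             break
--         window.append(row)
--     if not window or window[-1][0] <= 0:
--         return None
--     prices = sorted(price for _, (_, price) in window)
--     return prices[-1], prices[0], window[-1][0]
-- ===== Notes on version B (the rewrite author's own statement) =====
-- stated objective: alternative
-- what changed: B extracts the half-hour window prefix with an explicit break loop, then sorts the window's prices and reads the extremes off the ends of the sorted list, instead of A's fused running max/min accumulator seeded with sentinels.
-- intended difference: On windows with a positive last index whose prices are all negative (or all above 100000000), A returns a high of 0 (resp. a low of 100000000) left over from its loop initialisers, while B returns the true maximum (resp. minimum) price of the window, which is the intended high/low. — e.g. on get_high_low_half_hour(0, [(1, (0, -5))]): A returns some (0, -5, 1), B returns some (-5, -5, 1)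
import Mathlib
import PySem

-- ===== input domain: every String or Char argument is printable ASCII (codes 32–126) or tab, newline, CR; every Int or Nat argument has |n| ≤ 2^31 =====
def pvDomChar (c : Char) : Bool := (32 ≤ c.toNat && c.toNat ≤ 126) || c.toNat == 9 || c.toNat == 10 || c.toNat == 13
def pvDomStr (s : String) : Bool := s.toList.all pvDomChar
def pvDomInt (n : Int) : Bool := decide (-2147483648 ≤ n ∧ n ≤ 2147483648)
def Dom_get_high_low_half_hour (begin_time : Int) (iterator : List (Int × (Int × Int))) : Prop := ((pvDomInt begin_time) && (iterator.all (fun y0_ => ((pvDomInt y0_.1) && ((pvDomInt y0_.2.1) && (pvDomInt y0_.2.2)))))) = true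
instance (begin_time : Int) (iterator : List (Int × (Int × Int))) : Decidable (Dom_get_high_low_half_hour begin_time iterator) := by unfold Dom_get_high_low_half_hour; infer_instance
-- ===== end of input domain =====

-- B extracts the half-hour window with an explicit break loop, then sorts the window's
-- prices and reads high/low off the ends of the sorted list (A fuses a sentinel-seeded
-- running max/min into its scan); on all-negative / all-huge-price windows B returns the
-- true extremes where A returns its sentinels — stated as the intended difference D_.


-- ===== PORT A =====
-- A's for-loop with break, carrying (high_hh, low_hh, idx) as the loop state.
def pvLoopA (begin_time : Int) : List (Int × (Int × Int)) → Int → Int → Int → Option (Int × Int × Int)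
  | [], high_hh, low_hh, idx =>
      if idx > 0 then some (high_hh, low_hh, idx) else none
  | (i, (timestamp, price)) :: rest, high_hh, low_hh, idx =>
      if begin_time - timestamp < 1800000 then
        pvLoopA begin_time rest
          (if price > high_hh then price else high_hh)
          (if price < low_hh then price else low_hh)
          i
      else
        if idx > 0 then some (high_hh, low_hh, idx) else none

def get_high_low_half_hour (begin_time : Int) (iterator : List (Int × (Int × Int))) : Option (Int × Int × Int) :=
  pvLoopA begin_time iterator 0 100000000 (-1)

-- ===== PORT B =====
-- B's first loop: append rows until the break condition fires.
def pvWindowB (begin_time : Int) : List (Int × (Int × Int)) → List (Int × (Int × Int))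
  | [] => []
  | row :: rest =>
      if begin_time - row.2.1 ≥ 1800000 then []
      else row :: pvWindowB begin_time rest

-- sorted(...) is PySem.List.sorted; prices[-1] / prices[0] are pyGet? (-1) / 0.
def get_high_low_half_hour_alt (begin_time : Int) (iterator : List (Int × (Int × Int))) : Option (Int × Int × Int) :=
  match (pvWindowB begin_time iterator).getLast? with
  | none => none
  | some last =>
      if last.1 ≤ 0 then none
      else
        match PySem.List.pyGet? (PySem.List.sorted ((pvWindowB begin_time iterator).map (fun t => t.2.2)) (fun x => x) false) (-1),
              PySem.List.pyGet? (PySem.List.sorted ((pvWindowB begin_time iterator).map (fun t => t.2.2)) (fun x => x) false) 0 with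
        | some hi, some lo => some (hi, lo, last.1)
        | _, _ => none

-- ===== PRECONDITION & SPEC =====
-- On windows with a positive last index whose prices are all negative (or all above
-- 100000000), A returns a high of 0 (resp. a low of 100000000) left over from its loop
-- initialisers, while B returns the true maximum (resp. minimum) price of the window,
-- which is the intended high/low.
-- the rows of iterator inside the half-hour window before begin_time (closed-form, used only by D_)
def pvWin (begin_time : Int) (iterator : List (Int × (Int × Int))) : List (Int × (Int × Int)) :=
  iterator.takeWhile (fun t => decide (begin_time - t.2.1 < 1800000))

def D_get_high_low_half_hour (begin_time : Int) (iterator : List (Int × (Int × Int))) : Prop :=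
  ((pvWin begin_time iterator).getLastD default).1 > 0 ∧
  ((∀ t ∈ pvWin begin_time iterator, t.2.2 < 0) ∨ (∀ t ∈ pvWin begin_time iterator, t.2.2 > 100000000))
instance (begin_time : Int) (iterator : List (Int × (Int × Int))) : Decidable (D_get_high_low_half_hour begin_time iterator) := by unfold D_get_high_low_half_hour; infer_instance

def Spec_get_high_low_half_hour (begin_time : Int) (iterator : List (Int × (Int × Int))) (out : Option (Int × Int × Int)) : Prop := ¬ D_get_high_low_half_hour begin_time iterator → out = get_high_low_half_hour_alt begin_time iterator
instance (begin_time : Int) (iterator : List (Int × (Int × Int))) (out : Option (Int × Int × Int)) : Decidable (Spec_get_high_low_half_hour begin_time iterator out) := by unfold Spec_get_high_low_half_hour; infer_instance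

def pvDiffWitness_get_high_low_half_hour : Int × (List (Int × (Int × Int))) := (0, [(1, (0, -5))])
def pvDiffWitnessOut_get_high_low_half_hour : (Option (Int × Int × Int)) × (Option (Int × Int × Int)) := (some (0, -5, 1), some (-5, -5, 1))

-- ===== CLAIM (what is proved, stated in full; the proofs are below) =====
def Claim_unchanged_get_high_low_half_hour : Prop := ∀ (begin_time : Int) (iterator : List (Int × (Int × Int))), Dom_get_high_low_half_hour begin_time iterator → Spec_get_high_low_half_hour begin_time iterator (get_high_low_half_hour begin_time iterator)
def Claim_changed_get_high_low_half_hour : Prop := Dom_get_high_low_half_hour (pvDiffWitness_get_high_low_half_hour.1) (pvDiffWitness_get_high_low_half_hour.2) ∧ D_get_high_low_half_hour (pvDiffWitness_get_high_low_half_hour.1) (pvDiffWitness_get_high_low_half_hour.2) ∧ get_high_low_half_hour (pvDiffWitness_get_high_low_half_hour.1) (pvDiffWitness_get_high_low_half_hour.2) = pvDiffWitnessOut_get_high_low_half_hour.1 ∧ get_high_low_half_hour_alt (pvDiffWitness_get_high_low_half_hour.1) (pvDiffWitness_get_high_low_half_hour.2) = pvDiffWitnessOut_get_high_low_half_hour.2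 ∧ pvDiffWitnessOut_get_high_low_half_hour.1 ≠ pvDiffWitnessOut_get_high_low_half_hour.2
def Claim_exact_get_high_low_half_hour : Prop := ∀ (begin_time : Int) (iterator : List (Int × (Int × Int))), Dom_get_high_low_half_hour begin_time iterator → D_get_high_low_half_hour begin_time iterator → get_high_low_half_hour begin_time iterator ≠ get_high_low_half_hour_alt begin_time iterator

-- ===== LEMMAS AND PROOFS =====

theorem pvLoopA_eq (begin_time : Int) (l : List (Int × (Int × Int))) :
    ∀ (high low idx : Int),
      pvLoopA begin_time l high low idx =
        (match (l.takeWhile (fun t => decide (begin_time - t.2.1 < 1800000))).getLast? with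
         | none => if idx > 0 then some (high, low, idx) else none
         | some last =>
             if last.1 > 0 then
               some (((l.takeWhile (fun t => decide (begin_time - t.2.1 < 1800000))).map (fun t => t.2.2)).foldl max high,
                     ((l.takeWhile (fun t => decide (begin_time - t.2.1 < 1800000))).map (fun t => t.2.2)).foldl min low,
                     last.1)
             else none) := by
  induction l with
  | nil => intro high low idx; simp [pvLoopA]
  | cons hd tl ih =>
      intro high low idx
      obtain ⟨i, timestamp, price⟩ := hd
      by_cases h : begin_time - timestamp < 1800000
      · have hmax : (if price > high then price else high) = max high price := by
          simp [max_def]; omega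
        have hmin : (if price < low then price else low) = min low price := by
          simp [min_def]; omega
        rw [show pvLoopA begin_time ((i, (timestamp, price)) :: tl) high low idx
              = pvLoopA begin_time tl (max high price) (min low price) i by
            simp [pvLoopA, h, hmax, hmin]]
        rw [ih]
        simp only [List.takeWhile_cons, h, decide_true]
        cases hw : tl.takeWhile (fun t => decide (begin_time - t.2.1 < 1800000)) with
        | nil => simp
        | cons y ys =>
            obtain ⟨z, hz⟩ : ∃ z, (y :: ys).getLast? = some z :=
              ⟨(y :: ys).getLast (by simp), List.getLast?_eq_some_getLast (by simp)⟩
            simp only [if_true, List.getLast?_cons_cons, hz, List.map_cons, List.foldl_cons]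
      · simp [pvLoopA, h]

-- B's window loop is the takeWhile prefix.
theorem pvWindowB_eq (begin_time : Int) (l : List (Int × (Int × Int))) :
    pvWindowB begin_time l = l.takeWhile (fun t => decide (begin_time - t.2.1 < 1800000)) := by
  induction l with
  | nil => simp [pvWindowB]
  | cons hd tl ih =>
      by_cases h : begin_time - hd.2.1 ≥ 1800000
      · simp [pvWindowB, h, show ¬ (begin_time - hd.2.1 < 1800000) by omega]
      · simp [pvWindowB, h, show begin_time - hd.2.1 < 1800000 by omega, ih]


theorem sorted_getLast_max (l : List Int) (M : Int)
    (hM : (PySem.List.sorted l (fun x => x) false).getLast? = some M) :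
    M ∈ l ∧ ∀ y ∈ l, y ≤ M := by
  set s := PySem.List.sorted l (fun x => x) false with hs
  have hMs : M ∈ s := by rw [hs]; exact (PySem.List.mem_sorted _ _ _ M).2 ((PySem.List.mem_sorted _ _ _ M).1 (List.mem_of_getLast? hM))
  have hpw : s.Pairwise (fun a b => a ≤ b) := PySem.List.sorted_pairwise l (fun x => x)
  have hne : s ≠ [] := List.ne_nil_of_mem hMs
  have hMg : M = s.getLast hne := by
    rw [List.getLast?_eq_some_getLast hne] at hM
    exact (Option.some.injEq _ _).mp hM.symm
  refine ⟨(PySem.List.mem_sorted _ _ _ M).1 hMs, ?_⟩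
  intro y hy
  have hys : y ∈ s := (PySem.List.mem_sorted _ _ _ y).2 hy
  obtain ⟨n, hn, hgy⟩ := List.mem_iff_getElem.1 hys
  have hlast : s.getLast hne = s[s.length - 1]'(by omega) := List.getLast_eq_getElem hne
  rcases Nat.lt_or_ge n (s.length - 1) with hlt | hge
  · have h2 := List.pairwise_iff_getElem.1 hpw n (s.length - 1) (by omega) (by omega) hlt
    rw [hMg, hlast, ← hgy]; exact h2
  · have : n = s.length - 1 := by omega
    subst this; rw [hMg, hlast, ← hgy]

theorem sorted_head_min (l : List Int) (m : Int)
    (hm : (PySem.List.sorted l (fun x => x) false)[0]? = some m) :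
    m ∈ l ∧ ∀ y ∈ l, m ≤ y := by
  have hh : (PySem.List.sorted l (fun x => x) false).head? = some m := by
    rwa [List.head?_eq_getElem?]
  obtain ⟨t, ht⟩ := List.head?_eq_some_iff.mp hh
  constructor
  · exact (PySem.List.mem_sorted _ _ _ m).1 (by rw [ht]; exact List.mem_cons_self)
  · exact PySem.List.key_head_sorted_le _ _ ht

-- max/min of the nonempty price list via folds with a seed the list dominates
theorem foldl_max_eq (P : List Int) (M a : Int) (hMm : M ∈ P) (hub : ∀ y ∈ P, y ≤ M)
    (ha : a ≤ M) : P.foldl max a = M := by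
  apply le_antisymm
  · rcases PySem.List.foldl_max_mem P a with h | h
    · omega
    · exact hub _ h
  · exact (PySem.List.le_foldl_max P a).2 M hMm

theorem foldl_min_eq (P : List Int) (m a : Int) (hmm : m ∈ P) (hlb : ∀ y ∈ P, m ≤ y)
    (ha : m ≤ a) : P.foldl min a = m := by
  apply le_antisymm
  · exact (PySem.List.foldl_min_le P a).2 m hmm
  · rcases PySem.List.foldl_min_mem P a with h | h
    · omega
    · exact hlb _ h

theorem main_eq (begin_time : Int) (iterator : List (Int × (Int × Int)))
    (hnD : ¬ D_get_high_low_half_hour begin_time iterator) :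
    get_high_low_half_hour begin_time iterator = get_high_low_half_hour_alt begin_time iterator := by
  unfold get_high_low_half_hour get_high_low_half_hour_alt
  rw [pvLoopA_eq, pvWindowB_eq]
  unfold D_get_high_low_half_hour pvWin at hnD
  set W := iterator.takeWhile (fun t => decide (begin_time - t.2.1 < 1800000)) with hWdef
  cases hW : W.getLast? with
  | none => simp
  | some last =>
      by_cases hidx : last.1 > 0
      · have hWne : W ≠ [] := by intro h; rw [h] at hW; simp at hW
        have hlastD : W.getLastD default = last := by
          rw [List.getLastD_eq_getLast?, hW]; rfl
        push_neg at hnD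
        have hex := hnD (by rw [hlastD]; exact hidx)
        obtain ⟨⟨t1, ht1W, ht1⟩, ⟨t2, ht2W, ht2⟩⟩ := hex
        set P := W.map (fun t => t.2.2) with hPdef
        set S := PySem.List.sorted P (fun x => x) false with hSdef
        have hSne : S ≠ [] := by
          rw [hSdef, Ne, PySem.List.sorted_eq_nil_iff]
          simp [hPdef, hWne]
        obtain ⟨M, hM⟩ : ∃ M, S.getLast? = some M :=
          ⟨S.getLast hSne, List.getLast?_eq_some_getLast hSne⟩
        obtain ⟨m, hm⟩ : ∃ m, S[0]? = some m :=
          ⟨S.head hSne, by rw [← List.head?_eq_getElem?]; exact List.head?_eq_some_head hSne⟩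
        rw [PySem.List.pyGet?_neg_one, PySem.List.pyGet?_zero, hM, hm]
        obtain ⟨hMmem, hMub⟩ := sorted_getLast_max P M hM
        obtain ⟨hmmem, hmlb⟩ := sorted_head_min P m hm
        have h0M : (0 : Int) ≤ M := le_trans ht1 (hMub _ (List.mem_map_of_mem ht1W))
        have hm8 : m ≤ (100000000 : Int) := le_trans (hmlb _ (List.mem_map_of_mem ht2W)) ht2
        rw [foldl_max_eq P M 0 hMmem hMub h0M, foldl_min_eq P m 100000000 hmmem hmlb hm8]
        simp [hidx, show ¬ last.1 ≤ 0 by omega]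
      · simp [hidx, show last.1 ≤ 0 by omega]

-- inside D_ the two ports really differ everywhere
theorem tight_ne (begin_time : Int) (iterator : List (Int × (Int × Int)))
    (hD : D_get_high_low_half_hour begin_time iterator) :
    get_high_low_half_hour begin_time iterator ≠ get_high_low_half_hour_alt begin_time iterator := by
  unfold get_high_low_half_hour get_high_low_half_hour_alt
  rw [pvLoopA_eq, pvWindowB_eq]
  unfold D_get_high_low_half_hour pvWin at hD
  set W := iterator.takeWhile (fun t => decide (begin_time - t.2.1 < 1800000)) with hWdef
  obtain ⟨hidx', hext⟩ := hD
  have hWne : W ≠ [] := by intro h; rw [h] at hidx'; simp [default] at hidx'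
  obtain ⟨last, hW⟩ : ∃ last, W.getLast? = some last := by
    cases h : W.getLast? with
    | none => exact absurd (List.getLast?_eq_none_iff.mp h) hWne
    | some last => exact ⟨last, rfl⟩
  have hlastD : W.getLastD default = last := by
    rw [List.getLastD_eq_getLast?, hW]; rfl
  rw [hlastD] at hidx'
  rw [hW]
  simp only []
  set P := W.map (fun t => t.2.2) with hPdef
  set S := PySem.List.sorted P (fun x => x) false with hSdef
  have hSne : S ≠ [] := by
    rw [hSdef, Ne, PySem.List.sorted_eq_nil_iff]
    simp [hPdef, hWne]
  obtain ⟨M, hM⟩ : ∃ M, S.getLast? = some M :=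
    ⟨S.getLast hSne, List.getLast?_eq_some_getLast hSne⟩
  obtain ⟨m, hm⟩ : ∃ m, S[0]? = some m :=
    ⟨S.head hSne, by rw [← List.head?_eq_getElem?]; exact List.head?_eq_some_head hSne⟩
  rw [PySem.List.pyGet?_neg_one, PySem.List.pyGet?_zero, hM, hm]
  obtain ⟨hMmem, hMub⟩ := sorted_getLast_max P M hM
  obtain ⟨hmmem, hmlb⟩ := sorted_head_min P m hm
  rcases hext with hneg | hbig
  · -- all prices negative: A's high is 0, B's high is M < 0
    have hub0 : ∀ y ∈ P, y ≤ (0 : Int) := by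
      intro y hy
      obtain ⟨t, htW, rfl⟩ := List.mem_map.mp hy
      exact le_of_lt (hneg t htW)
    have hA : P.foldl max 0 = 0 := by
      rcases PySem.List.foldl_max_mem P 0 with h | h
      · exact h
      · have := hub0 _ h
        have := (PySem.List.le_foldl_max P 0).1
        omega
    obtain ⟨t, htW, hteq⟩ := List.mem_map.mp hMmem
    have hMneg : M < 0 := hteq ▸ hneg t htW
    intro hcontra
    simp only [hidx', show ¬ last.1 ≤ 0 by omega, hA, Option.some.injEq,
      Prod.mk.injEq, ite_true, ite_false] at hcontra
    omega
  · -- all prices above 100000000: A's low is 100000000, B's low is m > 100000000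
    have hlb8 : ∀ y ∈ P, (100000000 : Int) ≤ y := by
      intro y hy
      obtain ⟨t, htW, rfl⟩ := List.mem_map.mp hy
      exact le_of_lt (hbig t htW)
    have hA : P.foldl min 100000000 = 100000000 := by
      rcases PySem.List.foldl_min_mem P 100000000 with h | h
      · exact h
      · have := hlb8 _ h
        have := (PySem.List.foldl_min_le P 100000000).1
        omega
    obtain ⟨t, htW, hteq⟩ := List.mem_map.mp hmmem
    have hmbig : (100000000 : Int) < m := hteq ▸ hbig t htW
    intro hcontra
    simp only [hidx', show ¬ last.1 ≤ 0 by omega, hA, Option.some.injEq,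
      Prod.mk.injEq, ite_true, ite_false] at hcontra
    omega

-- ===== VERDICT (by name: the statement is the Claim_ definition above) =====
theorem get_high_low_half_hour_spec : Claim_unchanged_get_high_low_half_hour := by
  intro begin_time iterator _ hnD
  exact main_eq begin_time iterator hnD

theorem get_high_low_half_hour_changed : Claim_changed_get_high_low_half_hour := by
  unfold Claim_changed_get_high_low_half_hour; decide

theorem get_high_low_half_hour_tight : Claim_exact_get_high_low_half_hour := by
  intro begin_time iterator _ hD
  exact tight_ne begin_time iterator hD
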